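-- pv_equiv track=rewrite | github.com/sebastianrpalacios/deepcirc_development | dgd/utils/utils5.py | meets_criteria
-- ===== SOURCE A (Python) =====
-- def meets_criteria(perm):
--     """
--     Define the criteria that a permutation must meet.
--     Return True if the permutation meets the criteria, False otherwise.
--     """
--     group1 = {3, 4, 5}
--     group2 = {10, 11, 12}
--     group3 = {14, 15}
--     group4 = {16, 17, 18, 19}
--
--     # Check that the permutation includes at most one element from each group
--     group1_count = sum(1 for x in perm if x in group1)
--     group2_count = sum(1 for x in perm if x in group2)
--     group3_count = sum(1 for x in perm if x in group3)
--     group4_count = sum(1 for x in perm if x in group4)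
--
--     # Ensure at most one element from each group
--     return (group1_count <= 1 and
--             group2_count <= 1 and
--             group3_count <= 1 and
--             group4_count <= 1)
-- ===== SOURCE B (Python) =====
-- # Single-pass re-implementation: reverse-lookup map element -> group id, early-exit seen set.
-- _GROUP_OF = {3: 1, 4: 1, 5: 1,
--              10: 2, 11: 2, 12: 2,
--              14: 3, 15: 3,
--              16: 4, 17: 4, 18: 4, 19: 4}
--
-- def meets_criteria(perm):
--     seen = set()
--     for x in perm:
--         g = _GROUP_OF.get(x)
--         if g is None:
--             continue
--         if g in seen:
--             return False
--         seen.add(g)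
--     return True
-- ===== Notes on version B (the rewrite author's own statement) =====
-- stated objective: faster
-- what changed: Replaces four separate counting scans of the list (one per group) with a single early-exit pass using a prebuilt element-to-group reverse-lookup dict and a seen-group set.
import Mathlib
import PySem

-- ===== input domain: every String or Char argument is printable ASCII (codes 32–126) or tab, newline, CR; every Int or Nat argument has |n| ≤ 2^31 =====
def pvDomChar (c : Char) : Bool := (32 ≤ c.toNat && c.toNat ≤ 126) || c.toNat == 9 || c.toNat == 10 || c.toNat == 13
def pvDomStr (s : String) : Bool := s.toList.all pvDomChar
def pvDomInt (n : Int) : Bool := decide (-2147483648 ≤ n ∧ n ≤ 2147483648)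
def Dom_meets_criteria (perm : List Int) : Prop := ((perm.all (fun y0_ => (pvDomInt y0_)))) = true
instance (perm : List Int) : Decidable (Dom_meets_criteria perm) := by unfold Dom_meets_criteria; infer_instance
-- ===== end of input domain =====

-- B changes the algorithm: one early-exit pass with a reverse-lookup dict and a seen-group set
-- instead of A's four full counting scans (objective: faster by a constant factor).

-- ===== PORT A =====
-- membership tests 'x in groupN' of A
def pvInG1 (x : Int) : Bool := x == 3 || x == 4 || x == 5
def pvInG2 (x : Int) : Bool := x == 10 || x == 11 || x == 12
def pvInG3 (x : Int) : Bool := x == 14 || x == 15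
def pvInG4 (x : Int) : Bool := x == 16 || x == 17 || x == 18 || x == 19

def meets_criteria (perm : List Int) : Bool :=
  let group1_count : Int := perm.foldl (fun a x => if pvInG1 x then a + 1 else a) 0
  let group2_count : Int := perm.foldl (fun a x => if pvInG2 x then a + 1 else a) 0
  let group3_count : Int := perm.foldl (fun a x => if pvInG3 x then a + 1 else a) 0
  let group4_count : Int := perm.foldl (fun a x => if pvInG4 x then a + 1 else a) 0
  decide (group1_count ≤ 1) && decide (group2_count ≤ 1) &&
  decide (group3_count ≤ 1) && decide (group4_count ≤ 1)

-- ===== PORT B =====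
-- the module-level reverse-lookup dict _GROUP_OF of Source B
def pvGroupOf : PySem.Dict Int Int :=
  PySem.Dict.mk [(3, 1), (4, 1), (5, 1), (10, 2), (11, 2), (12, 2),
                 (14, 3), (15, 3), (16, 4), (17, 4), (18, 4), (19, 4)]

-- the for-loop of Source B with its early returns, as structural recursion over perm
def pvMcLoop (seen : PySem.Set Int) : List Int → Bool
  | [] => true
  | x :: rest =>
    match PySem.Dict.get? pvGroupOf x with
    | none => pvMcLoop seen rest
    | some g =>
      if PySem.Set.contains seen g then false
      else pvMcLoop (PySem.Set.add seen g) rest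

def meets_criteria_alt (perm : List Int) : Bool :=
  pvMcLoop PySem.Set.empty perm

-- ===== PRECONDITION & SPEC =====
def Spec_meets_criteria (perm : List Int) (out : Bool) : Prop := out = meets_criteria_alt perm
instance (perm : List Int) (out : Bool) : Decidable (Spec_meets_criteria perm out) := by unfold Spec_meets_criteria; infer_instance

-- ===== CLAIM (what is proved, stated in full; the proofs are below) =====
def Claim_equal_meets_criteria : Prop := ∀ (perm : List Int), Dom_meets_criteria perm → Spec_meets_criteria perm (meets_criteria perm)

-- ===== LEMMAS AND PROOFS =====

-- the counting fold of A equals countP, shifted by the accumulator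
theorem pv_foldl_count (p : Int → Bool) (xs : List Int) (a : Int) :
    xs.foldl (fun a x => if p x then a + 1 else a) a = a + (xs.countP p : Int) := by
  induction xs generalizing a with
  | nil => simp
  | cons x xs ih =>
    by_cases h : p x <;> simp [h, ih] <;> ring

-- the reverse map agrees with the four membership tests
theorem pv_groupOf_eq (x : Int) :
    PySem.Dict.get? pvGroupOf x =
      if pvInG1 x then some 1 else if pvInG2 x then some 2
      else if pvInG3 x then some 3 else if pvInG4 x then some 4 else none := by
  by_cases h1 : pvInG1 x = true
  · rw [if_pos h1]
    simp only [pvInG1, beq_iff_eq, Bool.or_eq_true] at h1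
    rcases h1 with (h | h) | h <;> subst h <;> rfl
  · rw [if_neg h1]
    by_cases h2 : pvInG2 x = true
    · rw [if_pos h2]
      simp only [pvInG2, beq_iff_eq, Bool.or_eq_true] at h2
      rcases h2 with (h | h) | h <;> subst h <;> rfl
    · rw [if_neg h2]
      by_cases h3 : pvInG3 x = true
      · rw [if_pos h3]
        simp only [pvInG3, beq_iff_eq, Bool.or_eq_true] at h3
        rcases h3 with h | h <;> subst h <;> rfl
      · rw [if_neg h3]
        by_cases h4 : pvInG4 x = true
        · rw [if_pos h4]
          simp only [pvInG4, beq_iff_eq, Bool.or_eq_true] at h4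
          rcases h4 with ((h | h) | h) | h <;> subst h <;> rfl
        · rw [if_neg h4]
          simp only [pvInG1, pvInG2, pvInG3, pvInG4, beq_iff_eq, Bool.or_eq_true,
            not_or] at h1 h2 h3 h4
          obtain ⟨⟨e3, e4⟩, e5⟩ := h1
          obtain ⟨⟨e10, e11⟩, e12⟩ := h2
          obtain ⟨e14, e15⟩ := h3
          obtain ⟨⟨⟨e16, e17⟩, e18⟩, e19⟩ := h4
          simp [pvGroupOf, PySem.Dict.get?_mk_cons, PySem.Dict.get?,
            Ne.symm e3, Ne.symm e4, Ne.symm e5, Ne.symm e10, Ne.symm e11, Ne.symm e12,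
            Ne.symm e14, Ne.symm e15, Ne.symm e16, Ne.symm e17, Ne.symm e18, Ne.symm e19]

-- if x is in one group it is in none of the others
theorem pv_only1 (x : Int) (h : pvInG1 x = true) :
    pvInG2 x = false ∧ pvInG3 x = false ∧ pvInG4 x = false := by
  simp only [pvInG1, Bool.or_eq_true, beq_iff_eq] at h
  refine ⟨?_, ?_, ?_⟩ <;>
    simp only [pvInG2, pvInG3, pvInG4, Bool.or_eq_false_iff, beq_eq_false_iff_ne] <;> omega

theorem pv_only2 (x : Int) (h : pvInG2 x = true) :
    pvInG1 x = false ∧ pvInG3 x = false ∧ pvInG4 x = false := by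
  simp only [pvInG2, Bool.or_eq_true, beq_iff_eq] at h
  refine ⟨?_, ?_, ?_⟩ <;>
    simp only [pvInG1, pvInG3, pvInG4, Bool.or_eq_false_iff, beq_eq_false_iff_ne] <;> omega

theorem pv_only3 (x : Int) (h : pvInG3 x = true) :
    pvInG1 x = false ∧ pvInG2 x = false ∧ pvInG4 x = false := by
  simp only [pvInG3, Bool.or_eq_true, beq_iff_eq] at h
  refine ⟨?_, ?_, ?_⟩ <;>
    simp only [pvInG1, pvInG2, pvInG4, Bool.or_eq_false_iff, beq_eq_false_iff_ne] <;> omega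

theorem pv_only4 (x : Int) (h : pvInG4 x = true) :
    pvInG1 x = false ∧ pvInG2 x = false ∧ pvInG3 x = false := by
  simp only [pvInG4, Bool.or_eq_true, beq_iff_eq] at h
  refine ⟨?_, ?_, ?_⟩ <;>
    simp only [pvInG1, pvInG2, pvInG3, Bool.or_eq_false_iff, beq_eq_false_iff_ne] <;> omega

-- remaining budget of group g given the seen set
def pvBud (seen : PySem.Set Int) (g : Int) : Nat :=
  if PySem.Set.contains seen g then 0 else 1

theorem pv_bud_add_self (seen : PySem.Set Int) (g : Int) :
    pvBud (PySem.Set.add seen g) g = 0 := by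
  simp [pvBud, PySem.Set.add, PySem.Set.contains]
  by_cases h : g ∈ seen <;> simp [h]

theorem pv_bud_add_ne (seen : PySem.Set Int) (g g' : Int) (h : g' ≠ g) :
    pvBud (PySem.Set.add seen g) g' = pvBud seen g' := by
  simp only [pvBud, PySem.Set.add, PySem.Set.contains]
  by_cases hg : PySem.Set.contains seen g = true <;>
    simp_all [PySem.Set.contains, h]

-- the early-exit loop succeeds iff every group stays within its remaining budget
theorem pv_loop_iff (xs : List Int) (seen : PySem.Set Int) :
    pvMcLoop seen xs = true ↔
      (xs.countP pvInG1 ≤ pvBud seen 1 ∧ xs.countP pvInG2 ≤ pvBud seen 2 ∧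
       xs.countP pvInG3 ≤ pvBud seen 3 ∧ xs.countP pvInG4 ≤ pvBud seen 4) := by
  induction xs generalizing seen with
  | nil => simp [pvMcLoop]
  | cons x xs ih =>
    rw [pvMcLoop, pv_groupOf_eq]
    by_cases h1 : pvInG1 x = true
    · obtain ⟨h2, h3, h4⟩ := pv_only1 x h1
      simp only [h1, if_true, List.countP_cons, h2, h3, h4, cond_true, cond_false]
      by_cases hsm : (1 : Int) ∈ seen
      · have hb : pvBud seen 1 = 0 := by simp [pvBud, PySem.Set.contains, hsm]
        simp [PySem.Set.contains, hsm, hb]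
      · have hs' : PySem.Set.contains seen 1 = false := by simp [PySem.Set.contains, hsm]
        have hb : pvBud seen 1 = 1 := by simp [pvBud, PySem.Set.contains, hsm]
        rw [hs', if_neg (by simp), ih, pv_bud_add_self,
          pv_bud_add_ne seen 1 2 (by norm_num), pv_bud_add_ne seen 1 3 (by norm_num),
          pv_bud_add_ne seen 1 4 (by norm_num), hb]
        norm_num
    · by_cases h2 : pvInG2 x = true
      · obtain ⟨h1', h3, h4⟩ := pv_only2 x h2
        simp only [h1', h2, Bool.false_eq_true, if_false, if_true, List.countP_cons,
          h3, h4, cond_true, cond_false]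
        by_cases hsm : (2 : Int) ∈ seen
        · have hb : pvBud seen 2 = 0 := by simp [pvBud, PySem.Set.contains, hsm]
          simp [PySem.Set.contains, hsm, hb]
        · have hs' : PySem.Set.contains seen 2 = false := by simp [PySem.Set.contains, hsm]
          have hb : pvBud seen 2 = 1 := by simp [pvBud, PySem.Set.contains, hsm]
          rw [hs', if_neg (by simp), ih, pv_bud_add_self,
            pv_bud_add_ne seen 2 1 (by norm_num), pv_bud_add_ne seen 2 3 (by norm_num),
            pv_bud_add_ne seen 2 4 (by norm_num), hb]
          norm_num
      · by_cases h3 : pvInG3 x = true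
        · obtain ⟨h1', h2', h4⟩ := pv_only3 x h3
          simp only [h1', h2', h3, Bool.false_eq_true, if_false, if_true,
            List.countP_cons, h4, cond_true, cond_false]
          by_cases hsm : (3 : Int) ∈ seen
          · have hb : pvBud seen 3 = 0 := by simp [pvBud, PySem.Set.contains, hsm]
            simp [PySem.Set.contains, hsm, hb]
          · have hs' : PySem.Set.contains seen 3 = false := by simp [PySem.Set.contains, hsm]
            have hb : pvBud seen 3 = 1 := by simp [pvBud, PySem.Set.contains, hsm]
            rw [hs', if_neg (by simp), ih, pv_bud_add_self,
              pv_bud_add_ne seen 3 1 (by norm_num), pv_bud_add_ne seen 3 2 (by norm_num),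
              pv_bud_add_ne seen 3 4 (by norm_num), hb]
            norm_num
        · by_cases h4 : pvInG4 x = true
          · obtain ⟨h1', h2', h3'⟩ := pv_only4 x h4
            simp only [h1', h2', h3', h4, Bool.false_eq_true, if_false, if_true,
              List.countP_cons, cond_true, cond_false]
            by_cases hsm : (4 : Int) ∈ seen
            · have hb : pvBud seen 4 = 0 := by simp [pvBud, PySem.Set.contains, hsm]
              simp [PySem.Set.contains, hsm, hb]
            · have hs' : PySem.Set.contains seen 4 = false := by simp [PySem.Set.contains, hsm]
              have hb : pvBud seen 4 = 1 := by simp [pvBud, PySem.Set.contains, hsm]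
              rw [hs', if_neg (by simp), ih, pv_bud_add_self,
                pv_bud_add_ne seen 4 1 (by norm_num), pv_bud_add_ne seen 4 2 (by norm_num),
                pv_bud_add_ne seen 4 3 (by norm_num), hb]
              norm_num
          · have h1' : pvInG1 x = false := by simp [h1]
            have h2' : pvInG2 x = false := by simp [h2]
            have h3' : pvInG3 x = false := by simp [h3]
            have h4' : pvInG4 x = false := by simp [h4]
            simp [h1', h2', h3', h4', ih]

-- ===== VERDICT (by name: the statement is the Claim_ definition above) =====
theorem meets_criteria_spec : Claim_equal_meets_criteria := by
  intro perm _
  unfold Spec_meets_criteria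
  rw [Bool.eq_iff_iff]
  have hB := pv_loop_iff perm PySem.Set.empty
  have hbud : ∀ g : Int, pvBud PySem.Set.empty g = 1 := by
    intro g; simp [pvBud, PySem.Set.empty, PySem.Set.contains]
  simp only [hbud] at hB
  unfold meets_criteria meets_criteria_alt
  rw [hB]
  simp only [pv_foldl_count, Int.zero_add, Bool.and_eq_true, decide_eq_true_eq]
  omega
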